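-- pv_equiv track=rewrite | github.com/Oneul-hyeon/Algorithm_Study | 프로그래머스/3/152995. 인사고과/인사고과.py | solution
-- ===== SOURCE A (Python) =====
-- def solution(scores):
--     # 1. 원호의 점수 합 구하기
--     wanho = scores[0]
--     wanho_summation = sum(scores[0])
--     # 2. 점수 목록 정렬
--     scores.sort(key = lambda x : [-x[0], x[1]])
--     # 3. 동료 평가 점수의 최댓값 변수 선언
--     max_score = 0
--     # 4.
--     answer = 1
--     for s1, s2 in scores :
--         # 4-1. 완호의 점수가 해당 점수보다 낮을 경우 -1 리턴
--         if wanho[0] < s1 and wanho[1] < s2 : return -1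
--         # 4-2. 동료 평가 점수가 현재 최댓값보다 낮은 경우
--         if max_score <= s2 :
--             # 4-2-1. 최댓값 업데이트
--             max_score = s2
--             # 4-2-2. 점수의 합이 완호보다 높은 경우 카운팅
--             if s1 + s2 > wanho_summation : answer += 1
--     # 5. 결과 리턴
--     return answer
-- ===== SOURCE B (Python) =====
-- # Direct Pareto-domination counting: no sort, no mutation of the argument
-- # (A sorts `scores` in place; equivalence is about the return value only).
-- def solution(scores):
--     w0, w1 = scores[0]
--     if any(s[0] > w0 and s[1] > w1 for s in scores):
--         return -1
--     wsum = w0 + w1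
--     return 1 + sum(1 for e in scores
--                    if e[0] + e[1] > wsum
--                    and not any(d[0] > e[0] and d[1] > e[1] for d in scores))
-- ===== Notes on version B (the rewrite author's own statement) =====
-- stated objective: alternative
-- what changed: Replaces A's in-place sort by (-a,b) plus a running-max single pass with two direct nested scans: return -1 if anyone strictly dominates Wanho, else count employees not strictly Pareto-dominated by anyone whose score sum exceeds Wanho's; B does not mutate the argument.
-- intended difference: On inputs where no one strictly dominates Wanho but some non-dominated employee has a negative second score and a score sum above Wanho's, A's max_score = 0 initialisation silently skips every such employee and returns a count that is too small, while B counts them, which is the intended Pareto-rank value. — e.g. on solution([[0, 0], [10, -1]]): A returns 1, B returns 2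
-- outside the precondition, e.g. on solution([[1, 1], [2, 2], [0, 0, 0]]): A returns -1, B returns -1
import Mathlib
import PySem

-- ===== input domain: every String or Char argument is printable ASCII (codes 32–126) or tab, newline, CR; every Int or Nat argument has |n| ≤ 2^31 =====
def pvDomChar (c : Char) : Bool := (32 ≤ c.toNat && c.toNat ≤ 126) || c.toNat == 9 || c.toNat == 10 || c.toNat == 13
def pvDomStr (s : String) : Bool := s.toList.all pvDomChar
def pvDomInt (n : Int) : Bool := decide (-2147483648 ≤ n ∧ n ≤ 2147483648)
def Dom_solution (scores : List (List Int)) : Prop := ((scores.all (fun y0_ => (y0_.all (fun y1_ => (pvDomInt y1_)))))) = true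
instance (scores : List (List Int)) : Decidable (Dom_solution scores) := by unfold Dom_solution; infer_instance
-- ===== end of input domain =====

-- B replaces A's in-place sort + running-max pass with direct nested Pareto-domination
-- scans (B does not mutate its argument; A sorts it in place — the equivalence proved
-- here is about the return value only).

-- ===== PORT A =====
-- Under Pre_ every row has length exactly 2, so tuple unpacking `s1, s2` is getD 0 / getD 1.
def pvFst (e : List Int) : Int := e.getD 0 0
def pvSnd (e : List Int) : Int := e.getD 1 0
-- Python's key `[-x[0], x[1]]` compares two-element int lists lexicographically;
-- `Lex (Int × Int)` carries exactly that order, so `sorted` with this key is exact.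
def pvKey (x : List Int) : Lex (Int × Int) := toLex (-(pvFst x), pvSnd x)

-- the `for s1, s2 in scores` loop of A, with its early `return -1`
def pvLoopA (w0 w1 wsum : Int) : List (List Int) → Int → Int → Int
  | [], _, answer => answer
  | s :: rest, maxScore, answer =>
    if w0 < pvFst s ∧ w1 < pvSnd s then -1
    else if maxScore ≤ pvSnd s then
      pvLoopA w0 w1 wsum rest (pvSnd s)
        (if wsum < pvFst s + pvSnd s then answer + 1 else answer)
    else pvLoopA w0 w1 wsum rest maxScore answer

def solution (scores : List (List Int)) : Int :=
  let wanho := scores.headD []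
  let wanhoSum := wanho.sum
  let ss := PySem.List.sorted scores pvKey
  pvLoopA (pvFst wanho) (pvSnd wanho) wanhoSum ss 0 1

-- ===== PORT B =====
def pvBeats (e d : List Int) : Bool := decide (pvFst e < pvFst d) && decide (pvSnd e < pvSnd d)

def solution_alt (scores : List (List Int)) : Int :=
  let w := scores.headD []
  if scores.any (fun s => pvBeats w s) then -1
  else
    1 + ((scores.filter (fun e =>
        decide (pvFst w + pvSnd w < pvFst e + pvSnd e)
          && !(scores.any (fun d => pvBeats e d)))).length : Int)

-- ===== PRECONDITION & SPEC =====
-- Pre_ excludes the empty list (A raises IndexError on scores[0]) and rows whose length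
-- is not exactly 2 (A's sort key or tuple unpacking raises IndexError/ValueError there,
-- except when an early `return -1` happens to precede the malformed row — see cites).
def Pre_solution (scores : List (List Int)) : Prop :=
  scores ≠ [] ∧ ∀ e ∈ scores, e.length = 2
instance (scores : List (List Int)) : Decidable (Pre_solution scores) := by
  unfold Pre_solution; infer_instance

def pvWitness_solution : List (List Int) := [[5, 5], [3, 3]]

-- On inputs where no one strictly dominates Wanho but some non-dominated employee has a
-- negative second score and a score sum above Wanho's, A's max_score = 0 initialisation
-- silently skips every such employee and returns a count that is too small, while B
-- counts them, which is the intended Pareto-rank value.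
def D_solution (scores : List (List Int)) : Prop :=
  let w := scores.headD []
  ∃ e ∈ scores, pvSnd e < 0 ∧ w.sum < e.sum ∧
    ∀ d ∈ scores, ∀ x ∈ [w, e], pvFst d ≤ pvFst x ∨ pvSnd d ≤ pvSnd x
instance (scores : List (List Int)) : Decidable (D_solution scores) := by
  unfold D_solution; infer_instance

def Spec_solution (scores : List (List Int)) (out : Int) : Prop :=
  ¬ D_solution scores → out = solution_alt scores
instance (scores : List (List Int)) (out : Int) : Decidable (Spec_solution scores out) := by
  unfold Spec_solution; infer_instance

def pvDiffWitness_solution : List (List Int) := [[0, 0], [10, -1]]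
def pvDiffWitnessOut_solution : Int × Int := (1, 2)

-- ===== CLAIM (what is proved, stated in full; the proofs are below) =====
def Claim_unchanged_solution : Prop := ∀ (scores : List (List Int)), Dom_solution scores → Pre_solution scores → Spec_solution scores (solution scores)
def Claim_changed_solution : Prop := Dom_solution (pvDiffWitness_solution) ∧ Pre_solution (pvDiffWitness_solution) ∧ D_solution (pvDiffWitness_solution) ∧ solution (pvDiffWitness_solution) = pvDiffWitnessOut_solution.1 ∧ solution_alt (pvDiffWitness_solution) = pvDiffWitnessOut_solution.2 ∧ pvDiffWitnessOut_solution.1 ≠ pvDiffWitnessOut_solution.2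
def Claim_exact_solution : Prop := ∀ (scores : List (List Int)), Dom_solution scores → Pre_solution scores → D_solution scores → solution scores ≠ solution_alt scores

-- ===== LEMMAS AND PROOFS =====

-- a length-2 row is [fst, snd], so its Python sum is fst + snd
theorem pvLen2 (l : List Int) (h : l.length = 2) : l = [pvFst l, pvSnd l] := by
  match l, h with
  | [a, b], _ => rfl

-- "e is not strictly dominated inside l"
def pvNod (l : List (List Int)) (e : List Int) : Prop :=
  ∀ d ∈ l, pvFst e < pvFst d → pvSnd d ≤ pvSnd e

-- A's loop returns -1 as soon as some remaining row strictly dominates Wanho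
theorem pvLoopA_neg (w0 w1 wsum : Int) (ss : List (List Int)) (m a : Int)
    (h : ∃ s ∈ ss, w0 < pvFst s ∧ w1 < pvSnd s) :
    pvLoopA w0 w1 wsum ss m a = -1 := by
  induction ss generalizing m a with
  | nil => simp at h
  | cons s rest ih =>
    rcases h with ⟨d, hd, hdom⟩
    rcases List.mem_cons.mp hd with rfl | hmem
    · simp [pvLoopA, hdom]
    · by_cases hs : w0 < pvFst s ∧ w1 < pvSnd s
      · simp [pvLoopA, hs]
      · simp only [pvLoopA, if_neg hs]
        split_ifs <;> exact ih _ _ ⟨d, hmem, hdom⟩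

-- A's counting loop, separated from the early return
def pvCount (wsum : Int) : List (List Int) → Int → Int
  | [], _ => 0
  | s :: rest, m =>
    if m ≤ pvSnd s then
      (if wsum < pvFst s + pvSnd s then 1 else 0) + pvCount wsum rest (pvSnd s)
    else pvCount wsum rest m

theorem pvLoopA_eq_count (w0 w1 wsum : Int) (ss : List (List Int)) (m a : Int)
    (h : ∀ s ∈ ss, ¬(w0 < pvFst s ∧ w1 < pvSnd s)) :
    pvLoopA w0 w1 wsum ss m a = a + pvCount wsum ss m := by
  induction ss generalizing m a with
  | nil => simp [pvLoopA, pvCount]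
  | cons s rest ih =>
    have hs := h s (List.mem_cons_self ..)
    have ht : ∀ x ∈ rest, ¬(w0 < pvFst x ∧ w1 < pvSnd x) :=
      fun x hx => h x (List.mem_cons_of_mem _ hx)
    simp only [pvLoopA, pvCount, if_neg hs]
    split_ifs with h1 h2 <;> rw [ih _ _ ht] <;> ring

-- B's counted predicate, and A's (which additionally demands a nonnegative second score)
def pvPredB (scores : List (List Int)) (wsum : Int) (e : List Int) : Bool :=
  decide (wsum < pvFst e + pvSnd e)
    && scores.all (fun d => decide (pvFst e < pvFst d → pvSnd d ≤ pvSnd e))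

theorem pvAllNod (scores : List (List Int)) (e : List Int) :
    (scores.all (fun d => decide (pvFst e < pvFst d → pvSnd d ≤ pvSnd e)) = true) ↔ pvNod scores e := by
  simp only [List.all_eq_true, decide_eq_true_eq, pvNod]
def pvPredA (scores : List (List Int)) (wsum : Int) (e : List Int) : Bool :=
  decide (0 ≤ pvSnd e) && pvPredB scores wsum e

-- the crux: on a key-sorted suffix ss with running max m, A's count is the number of
-- rows that are globally non-dominated, have nonnegative second score and beat wsum
theorem pvCount_char (scores : List (List Int)) (wsum : Int) :
    ∀ (ss : List (List Int)) (m : Int),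
    0 ≤ m →
    (∀ e ∈ ss, (0 ≤ pvSnd e ∧ pvNod scores e) → m ≤ pvSnd e) →
    (∀ e ∈ ss, ¬ pvNod scores e →
      (∃ d ∈ ss, pvFst e < pvFst d ∧ pvSnd e < pvSnd d) ∨ pvSnd e < m) →
    ss.Pairwise (fun x y => pvKey x ≤ pvKey y) →
    (∀ x ∈ ss, x ∈ scores) →
    pvCount wsum ss m = ((ss.countP (pvPredA scores wsum)) : Int) := by
  intro ss
  induction ss with
  | nil => intro m _ _ _ _ _; simp [pvCount]
  | cons s rest ih =>
    intro m hm0 h2 h3 hpw hsub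
    have hpw_head : ∀ e ∈ rest, pvKey s ≤ pvKey e := (List.pairwise_cons.mp hpw).1
    have hpw_tail := (List.pairwise_cons.mp hpw).2
    have hs_mem : s ∈ scores := hsub s (List.mem_cons_self ..)
    have hsub' : ∀ x ∈ rest, x ∈ scores := fun x hx => hsub x (List.mem_cons_of_mem _ hx)
    by_cases hms : m ≤ pvSnd s
    · -- s is examined: it is globally non-dominated and has 0 ≤ snd
      have hnod : pvNod scores s := by
        by_contra hno
        rcases h3 s (List.mem_cons_self ..) hno with ⟨d, hd, hdom⟩ | hlt
        · rcases List.mem_cons.mp hd with rfl | hdr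
          · exact absurd hdom.1 (lt_irrefl _)
          · have := hpw_head d hdr
            rw [pvKey, pvKey, Prod.Lex.toLex_le_toLex] at this
            rcases this with h | ⟨h, _⟩ <;> omega
        · omega
      have hs0 : 0 ≤ pvSnd s := le_trans hm0 hms
      have hcnt : pvPredA scores wsum s = decide (wsum < pvFst s + pvSnd s) := by
        simp only [pvPredA, pvPredB]
        rw [(pvAllNod scores s).mpr hnod, decide_eq_true hs0]
        simp
      have h2' : ∀ e ∈ rest, (0 ≤ pvSnd e ∧ pvNod scores e) → pvSnd s ≤ pvSnd e := by
        intro e he ⟨he0, hen⟩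
        have := hpw_head e he
        rw [pvKey, pvKey, Prod.Lex.toLex_le_toLex] at this
        rcases this with h | ⟨h, h'⟩
        · exact hen s hs_mem (by omega)
        · omega
      have h3' : ∀ e ∈ rest, ¬ pvNod scores e →
          (∃ d ∈ rest, pvFst e < pvFst d ∧ pvSnd e < pvSnd d) ∨ pvSnd e < pvSnd s := by
        intro e he hno
        rcases h3 e (List.mem_cons_of_mem _ he) hno with ⟨d, hd, hdom⟩ | hlt
        · rcases List.mem_cons.mp hd with rfl | hdr
          · exact Or.inr hdom.2
          · exact Or.inl ⟨d, hdr, hdom⟩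
        · exact Or.inr (by omega)
      rw [pvCount, if_pos hms, ih (pvSnd s) hs0 h2' h3' hpw_tail hsub',
        List.countP_cons, hcnt]
      simp only [decide_eq_true_eq]
      split_ifs with h <;> push_cast <;> ring
    · -- s is skipped: it cannot satisfy pvPredA
      have hcnt : pvPredA scores wsum s = false := by
        by_contra h
        have h' : pvPredA scores wsum s = true := by
          cases hh : pvPredA scores wsum s with
          | true => rfl
          | false => exact absurd hh h
        simp only [pvPredA, pvPredB, Bool.and_eq_true, decide_eq_true_eq, pvAllNod] at h'
        exact hms (h2 s (List.mem_cons_self ..) ⟨h'.1, h'.2.2⟩)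
      have h3' : ∀ e ∈ rest, ¬ pvNod scores e →
          (∃ d ∈ rest, pvFst e < pvFst d ∧ pvSnd e < pvSnd d) ∨ pvSnd e < m := by
        intro e he hno
        rcases h3 e (List.mem_cons_of_mem _ he) hno with ⟨d, hd, hdom⟩ | hlt
        · rcases List.mem_cons.mp hd with rfl | hdr
          · -- s dominates e, and pvSnd s < m: already reflected in m
            exact Or.inr (by omega)
          · exact Or.inl ⟨d, hdr, hdom⟩
        · exact Or.inr hlt
      rw [pvCount, if_neg hms,
        ih m hm0 (fun e he h => h2 e (List.mem_cons_of_mem _ he) h) h3' hpw_tail hsub',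
        List.countP_cons, hcnt]
      simp

-- A as a closed formula, when no one strictly dominates Wanho
theorem solution_char (scores : List (List Int)) (hpre : Pre_solution scores)
    (hnd : ∀ s ∈ scores, ¬(pvFst (scores.headD []) < pvFst s ∧ pvSnd (scores.headD []) < pvSnd s)) :
    solution scores =
      1 + ((scores.countP (pvPredA scores (pvFst (scores.headD []) + pvSnd (scores.headD [])))) : Int) := by
  obtain ⟨hne, hlen⟩ := hpre
  have hhead : scores.headD [] ∈ scores := by
    cases scores with
    | nil => exact absurd rfl hne
    | cons a t => exact List.mem_cons_self ..
  have hsum : (scores.headD []).sum = pvFst (scores.headD []) + pvSnd (scores.headD []) := by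
    rw [pvLen2 _ (hlen _ hhead)]; simp [pvFst, pvSnd]
  have hperm : (PySem.List.sorted scores pvKey).Perm scores := PySem.List.sorted_perm scores pvKey false
  have hnd' : ∀ s ∈ PySem.List.sorted scores pvKey,
      ¬(pvFst (scores.headD []) < pvFst s ∧ pvSnd (scores.headD []) < pvSnd s) :=
    fun s hs => hnd s (hperm.mem_iff.mp hs)
  show pvLoopA _ _ _ _ 0 1 = _
  rw [hsum, pvLoopA_eq_count _ _ _ _ _ _ hnd',
    pvCount_char scores _ (PySem.List.sorted scores pvKey) 0 le_rfl
      (fun e _ h => h.1)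
      (fun e he hno => by
        rw [pvNod] at hno; push_neg at hno
        obtain ⟨d, hdm, h1, h2⟩ := hno
        exact Or.inl ⟨d, hperm.mem_iff.mpr hdm, h1, by omega⟩)
      (PySem.List.sorted_pairwise scores pvKey)
      (fun x hx => hperm.mem_iff.mp hx),
    hperm.countP_eq]

-- B's filter predicate written through pvNod
theorem pvPredB_eq (scores : List (List Int)) (wsum : Int) (e : List Int) :
    (decide (wsum < pvFst e + pvSnd e) && !(scores.any (fun d => pvBeats e d)))
      = pvPredB scores wsum e := by
  simp only [pvPredB, pvBeats]
  congr 1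
  by_cases h : pvNod scores e
  · have hf : (scores.any fun d => decide (pvFst e < pvFst d) && decide (pvSnd e < pvSnd d)) = false := by
      rw [List.any_eq_false]
      intro d hd
      simp only [Bool.and_eq_true, decide_eq_true_eq, not_and, not_lt]
      exact h d hd
    rw [hf, (pvAllNod scores e).mpr h]
    rfl
  · have ht : (scores.any fun d => decide (pvFst e < pvFst d) && decide (pvSnd e < pvSnd d)) = true := by
      rw [List.any_eq_true]
      rw [pvNod] at h; push_neg at h
      obtain ⟨d, hd, h1, h2⟩ := h
      exact ⟨d, hd, by simp only [Bool.and_eq_true, decide_eq_true_eq]; omega⟩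
    have hall : (scores.all fun d => decide (pvFst e < pvFst d → pvSnd d ≤ pvSnd e)) = false := by
      rw [List.all_eq_false]
      rw [pvNod] at h; push_neg at h
      obtain ⟨d, hd, h1, h2⟩ := h
      exact ⟨d, hd, by simp only [decide_eq_true_eq]; omega⟩
    rw [ht, hall]
    rfl

-- B as the same shape of formula
theorem solution_alt_char (scores : List (List Int))
    (hnd : ∀ s ∈ scores, ¬(pvFst (scores.headD []) < pvFst s ∧ pvSnd (scores.headD []) < pvSnd s)) :
    solution_alt scores =
      1 + ((scores.countP (pvPredB scores (pvFst (scores.headD []) + pvSnd (scores.headD [])))) : Int) := by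
  have hany : scores.any (fun s => pvBeats (scores.headD []) s) = false := by
    rw [List.any_eq_false]
    intro s hs
    have h := hnd s hs
    simp only [pvBeats, Bool.and_eq_true, decide_eq_true_eq, not_and, not_lt]
    intro h1
    omega
  show (if _ then _ else _) = _
  rw [hany]
  simp only [Bool.false_eq_true, if_false]
  rw [← List.countP_eq_length_filter]
  simp only [pvPredB_eq]

-- strict count: if p implies q on l and some member satisfies q but not p, countP p < countP q
theorem pvCountP_lt {α : Type} (l : List α) (p q : α → Bool)
    (himp : ∀ x ∈ l, p x = true → q x = true)
    (e : α) (he : e ∈ l) (hq : q e = true) (hp : p e = false) :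
    l.countP p < l.countP q := by
  induction l with
  | nil => simp at he
  | cons a t ih =>
    rcases List.mem_cons.mp he with rfl | hmem
    · have hle : t.countP p ≤ t.countP q :=
        List.countP_mono_left (fun x hx => himp x (List.mem_cons_of_mem _ hx))
      rw [List.countP_cons, List.countP_cons, hp, hq]
      simp; omega
    · have hlt := ih (fun x hx => himp x (List.mem_cons_of_mem _ hx)) hmem
      rw [List.countP_cons, List.countP_cons]
      have := himp a (List.mem_cons_self ..)
      cases hpa : p a with
      | true => rw [this hpa]; simpa using hlt
      | false => cases q a <;> simp <;> omega

-- ===== VERDICT (by name: the statement is the Claim_ definition above) =====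
theorem solution_spec : Claim_unchanged_solution := by
  intro scores hdom hpre hnD
  show solution scores = solution_alt scores
  by_cases hnd : ∀ s ∈ scores, ¬(pvFst (scores.headD []) < pvFst s ∧ pvSnd (scores.headD []) < pvSnd s)
  · -- no one dominates Wanho: both are 1 + a count, and ¬D makes the predicates agree
    rw [solution_char scores hpre hnd, solution_alt_char scores hnd]
    have hhead : scores.headD [] ∈ scores := by
      cases scores with
      | nil => exact absurd rfl hpre.1
      | cons a t => exact List.mem_cons_self ..
    have hsum : ∀ x ∈ scores, x.sum = pvFst x + pvSnd x := fun x hx => by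
      rw [pvLen2 x (hpre.2 x hx)]; simp [pvFst, pvSnd]
    have hnobad : ∀ e ∈ scores, ¬(pvSnd e < 0 ∧
        pvFst (scores.headD []) + pvSnd (scores.headD []) < pvFst e + pvSnd e ∧
        ∀ d ∈ scores, ¬(pvFst e < pvFst d ∧ pvSnd e < pvSnd d)) := by
      intro e he hbad
      refine hnD ⟨e, he, hbad.1,
        by rw [hsum _ hhead, hsum _ he]; exact hbad.2.1, fun d hd x hx => ?_⟩
      rcases List.mem_cons.mp hx with rfl | hx
      · have := hnd d hd; omega
      · rcases List.mem_cons.mp hx with rfl | hx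
        · have := hbad.2.2 d hd; omega
        · simp at hx
    congr 2
    apply List.countP_congr
    intro e he
    simp only [pvPredA, pvPredB, Bool.and_eq_true, decide_eq_true_eq, pvAllNod, pvNod]
    constructor
    · rintro ⟨h0, h⟩; exact h
    · rintro ⟨h1, h2⟩
      refine ⟨?_, h1, h2⟩
      by_contra h0
      exact hnobad e he ⟨by omega, h1, fun d hd hdm => by have := h2 d hd hdm.1; omega⟩
  · -- someone dominates Wanho: both return -1
    push_neg at hnd
    obtain ⟨d, hdm, hdom'⟩ := hnd
    have hA : solution scores = -1 := by
      show pvLoopA _ _ _ _ 0 1 = -1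
      apply pvLoopA_neg
      exact ⟨d, (PySem.List.sorted_perm scores pvKey false).mem_iff.mpr hdm, hdom'⟩
    have hB : solution_alt scores = -1 := by
      show (if _ then _ else _) = -1
      have : scores.any (fun s => pvBeats (scores.headD []) s) = true := by
        simp only [List.any_eq_true]
        exact ⟨d, hdm, by simp only [pvBeats, Bool.and_eq_true, decide_eq_true_eq]; omega⟩
      rw [this]; simp
    rw [hA, hB]

theorem solution_changed : Claim_changed_solution := by
  unfold Claim_changed_solution; decide

theorem solution_tight : Claim_exact_solution := by
  intro scores hdom hpre hD
  obtain ⟨e, he, he1, he2s, hboth⟩ := hD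
  have he3 : ∀ d ∈ scores, ¬(pvFst e < pvFst d ∧ pvSnd e < pvSnd d) := by
    intro d hd hc
    have := hboth d hd e (by simp)
    omega
  have hnd : ∀ s ∈ scores, ¬(pvFst (scores.headD []) < pvFst s ∧ pvSnd (scores.headD []) < pvSnd s) := by
    intro d hd hc
    have := hboth d hd (scores.headD []) (by simp)
    omega
  have hhead : scores.headD [] ∈ scores := by
    cases scores with
    | nil => exact absurd rfl hpre.1
    | cons a t => exact List.mem_cons_self ..
  have hsum : ∀ x ∈ scores, x.sum = pvFst x + pvSnd x := fun x hx => by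
    rw [pvLen2 x (hpre.2 x hx)]; simp [pvFst, pvSnd]
  have he2 : pvFst (scores.headD []) + pvSnd (scores.headD []) < pvFst e + pvSnd e := by
    rw [hsum _ hhead, hsum _ he] at he2s; exact he2s
  rw [solution_char scores hpre hnd, solution_alt_char scores hnd]
  have hlt : scores.countP (pvPredA scores (pvFst (scores.headD []) + pvSnd (scores.headD []))) <
      scores.countP (pvPredB scores (pvFst (scores.headD []) + pvSnd (scores.headD []))) := by
    apply pvCountP_lt _ _ _ (fun x _ hx => by
        simp only [pvPredA, Bool.and_eq_true] at hx; exact hx.2) e he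
    · simp only [pvPredB, Bool.and_eq_true, decide_eq_true_eq, pvAllNod, pvNod]
      refine ⟨he2, fun d hd hdm => ?_⟩
      have := he3 d hd
      omega
    · simp only [pvPredA, Bool.and_eq_false_iff, decide_eq_false_iff_not, not_le]
      exact Or.inl he1
  intro hcontra
  have : (scores.countP (pvPredA scores (pvFst (scores.headD []) + pvSnd (scores.headD []))) : Int) =
      (scores.countP (pvPredB scores (pvFst (scores.headD []) + pvSnd (scores.headD []))) : Int) := by
    omega
  omega
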